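-- pv_equiv track=rewrite | github.com/MrBrantCode/unitest_baseline | mut_generate/mist_train_taco/taco_16811/solution.py | answer
-- ===== SOURCE A (Python) =====
-- def answer(b, finish, start, m):
--     assert len(start) == len(finish)
--     rv = 0
--     for (s, f) in zip(start, finish):
--         rv *= b
--         rv %= m
--         rv += f - s
--     return rv % m
-- ===== SOURCE B (Python) =====
-- def answer(b, finish, start, m):
--     assert len(start) == len(finish)
--     result = 0
--     p = 1
--     for s, f in reversed(list(zip(start, finish))):
--         result = (result + (f - s) * p) % m
--         p = p * b % m
--     return result % m
-- ===== Notes on version B (the rewrite author's own statement) =====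
-- stated objective: alternative
-- what changed: Replaces A's Horner accumulation with a reverse-order weighted sum: iterate the zipped pairs backwards, adding each difference times an accumulated power of b (kept reduced mod m), instead of multiply-then-reduce-then-add per step.
import Mathlib
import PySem

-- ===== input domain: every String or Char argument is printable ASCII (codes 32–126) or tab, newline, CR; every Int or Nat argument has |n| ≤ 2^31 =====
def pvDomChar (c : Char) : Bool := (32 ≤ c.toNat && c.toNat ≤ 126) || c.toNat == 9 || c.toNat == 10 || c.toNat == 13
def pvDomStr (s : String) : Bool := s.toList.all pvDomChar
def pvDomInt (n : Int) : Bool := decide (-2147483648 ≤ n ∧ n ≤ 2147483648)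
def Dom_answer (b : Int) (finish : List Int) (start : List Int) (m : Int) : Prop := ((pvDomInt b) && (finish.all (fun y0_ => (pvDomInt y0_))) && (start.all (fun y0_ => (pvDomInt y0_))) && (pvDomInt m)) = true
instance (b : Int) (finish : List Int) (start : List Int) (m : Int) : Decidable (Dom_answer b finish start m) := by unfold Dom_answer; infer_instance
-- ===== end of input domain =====

-- B replaces A's Horner accumulation with a reverse-order weighted sum of differences
-- times an accumulated (reduced) power of b; same O(n) cost, different decomposition.

-- ===== PORT A =====
-- rv = 0; for (s,f) in zip(start,finish): rv *= b; rv %= m; rv += f - s; return rv % m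
def answer (b : Int) (finish : List Int) (start : List Int) (m : Int) : Int :=
  PySem.Int.mod
    ((start.zip finish).foldl (fun rv p => PySem.Int.mod (rv * b) m + (p.2 - p.1)) 0) m

-- ===== PORT B =====
-- result = 0; p = 1
-- for (s,f) in reversed(list(zip(start,finish))):
--   result = (result + (f - s) * p) % m; p = p * b % m
-- return result % m
def answer_alt (b : Int) (finish : List Int) (start : List Int) (m : Int) : Int :=
  let st := (start.zip finish).reverse.foldl
    (fun (st : Int × Int) q =>
      (PySem.Int.mod (st.1 + (q.2 - q.1) * st.2) m, PySem.Int.mod (st.2 * b) m)) (0, 1)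
  PySem.Int.mod st.1 m

-- ===== PRECONDITION & SPEC =====
-- Pre_ excludes exactly the inputs where A raises: m = 0 (ZeroDivisionError in 'rv %= m'
-- or the final '% m') and unequal lengths (AssertionError from the assert).
def Pre_answer (b : Int) (finish : List Int) (start : List Int) (m : Int) : Prop :=
  start.length = finish.length ∧ m ≠ 0
instance (b : Int) (finish : List Int) (start : List Int) (m : Int) : Decidable (Pre_answer b finish start m) := by unfold Pre_answer; infer_instance
def pvWitness_answer : Int × List Int × List Int × Int := (3, [7, 2, 5], [1, 4, 6], 10)

def Spec_answer (b : Int) (finish : List Int) (start : List Int) (m : Int) (out : Int) : Prop := out = answer_alt b finish start m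
instance (b : Int) (finish : List Int) (start : List Int) (m : Int) (out : Int) : Decidable (Spec_answer b finish start m out) := by unfold Spec_answer; infer_instance

-- ===== CLAIM (what is proved, stated in full; the proofs are below) =====
def Claim_equal_answer : Prop := ∀ (b : Int) (finish : List Int) (start : List Int) (m : Int), Dom_answer b finish start m → Pre_answer b finish start m → Spec_answer b finish start m (answer b finish start m)

-- ===== LEMMAS AND PROOFS =====

-- the plain (unreduced) Horner value of the difference polynomial
def pvHorner (b : Int) (l : List (Int × Int)) (a : Int) : Int :=
  l.foldl (fun rv p => rv * b + (p.2 - p.1)) a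

-- Python's mod differs from its argument by a multiple of the modulus
theorem pv_mod_sub_dvd (x m : Int) : m ∣ (x - PySem.Int.mod x m) := by
  have h := PySem.Int.floordiv_mul_add_mod x m
  exact ⟨PySem.Int.floordiv x m, by linarith⟩

-- Python's mod is a congruence: equal on inputs that differ by a multiple of m
theorem pv_mod_congr (x y m : Int) (h : m ∣ (x - y)) :
    PySem.Int.mod x m = PySem.Int.mod y m := by
  rcases eq_or_ne m 0 with hm | hm
  · subst hm
    have hxy : x = y := by rcases h with ⟨k, hk⟩; omega
    rw [hxy]
  · obtain ⟨kx, hkx⟩ := pv_mod_sub_dvd x m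
    obtain ⟨ky, hky⟩ := pv_mod_sub_dvd y m
    obtain ⟨kd, hkd⟩ := h
    have hd : PySem.Int.mod x m - PySem.Int.mod y m = m * (kd - kx + ky) := by
      linear_combination hkd - hkx + hky
    rcases lt_or_gt_of_ne hm with hneg | hpos
    · obtain ⟨b1, b2⟩ := PySem.Int.mod_neg_bounds x hneg
      obtain ⟨b3, b4⟩ := PySem.Int.mod_neg_bounds y hneg
      rcases lt_trichotomy (kd - kx + ky) 0 with h0 | h0 | h0 <;> nlinarith
    · have b1 := PySem.Int.mod_nonneg x hpos
      have b2 := PySem.Int.mod_lt x hpos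
      have b3 := PySem.Int.mod_nonneg y hpos
      have b4 := PySem.Int.mod_lt y hpos
      rcases lt_trichotomy (kd - kx + ky) 0 with h0 | h0 | h0 <;> nlinarith

-- A's reduced accumulator stays congruent to the plain Horner value
theorem pv_A_congr (b m : Int) (l : List (Int × Int)) :
    ∀ (a h : Int), m ∣ (a - h) →
      m ∣ (l.foldl (fun rv p => PySem.Int.mod (rv * b) m + (p.2 - p.1)) a - pvHorner b l h) := by
  induction l with
  | nil => intro a h hah; simpa [pvHorner] using hah
  | cons x t ih =>
    intro a h hah
    simp only [List.foldl_cons, pvHorner] at *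
    apply ih
    obtain ⟨k1, hk1⟩ := pv_mod_sub_dvd (a * b) m
    obtain ⟨k2, hk2⟩ := hah
    exact ⟨-k1 + k2 * b, by linear_combination -hk1 + b * hk2⟩

-- B's per-step-reduced state stays congruent (componentwise) to the unreduced state
theorem pv_B_congr (b m : Int) (l : List (Int × Int)) :
    ∀ (r p r' p' : Int), m ∣ (r - r') → m ∣ (p - p') →
      m ∣ ((l.foldl (fun (st : Int × Int) q =>
              (PySem.Int.mod (st.1 + (q.2 - q.1) * st.2) m, PySem.Int.mod (st.2 * b) m)) (r, p)).1
           - (l.foldl (fun (st : Int × Int) q =>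
              (st.1 + (q.2 - q.1) * st.2, st.2 * b)) (r', p')).1) := by
  induction l with
  | nil => intro r p r' p' hr _; simpa using hr
  | cons x t ih =>
    intro r p r' p' hr hp
    simp only [List.foldl_cons]
    apply ih
    · obtain ⟨k1, hk1⟩ := pv_mod_sub_dvd (r + (x.2 - x.1) * p) m
      obtain ⟨k2, hk2⟩ := hr
      obtain ⟨k3, hk3⟩ := hp
      exact ⟨-k1 + k2 + (x.2 - x.1) * k3, by
        linear_combination -hk1 + hk2 + (x.2 - x.1) * hk3⟩
    · obtain ⟨k1, hk1⟩ := pv_mod_sub_dvd (p * b) m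
      obtain ⟨k3, hk3⟩ := hp
      exact ⟨-k1 + k3 * b, by linear_combination -hk1 + b * hk3⟩

-- Horner with a shifted seed
theorem pv_horner_seed (b : Int) (l : List (Int × Int)) :
    ∀ a : Int, pvHorner b l a = a * b ^ l.length + pvHorner b l 0 := by
  induction l with
  | nil => intro a; simp [pvHorner]
  | cons x t ih =>
    intro a
    simp only [pvHorner, List.foldl_cons, List.length_cons] at *
    rw [ih (a * b + (x.2 - x.1)), ih (0 * b + (x.2 - x.1))]
    ring

-- the unreduced reversed weighted-sum loop computes the plain Horner value
theorem pv_B_horner (b : Int) (l : List (Int × Int)) :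
    ∀ (r p : Int),
      l.reverse.foldl (fun (st : Int × Int) q => (st.1 + (q.2 - q.1) * st.2, st.2 * b)) (r, p)
        = (r + p * pvHorner b l 0, p * b ^ l.length) := by
  induction l with
  | nil => intro r p; simp [pvHorner]
  | cons x t ih =>
    intro r p
    simp only [List.reverse_cons, List.foldl_append, List.foldl_cons, List.foldl_nil,
      List.length_cons, ih]
    have hH : pvHorner b (x :: t) 0 = (x.2 - x.1) * b ^ t.length + pvHorner b t 0 := by
      show pvHorner b t ((0 : Int) * b + (x.2 - x.1)) = _
      rw [pv_horner_seed b t]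
      ring
    rw [hH, Prod.mk.injEq]
    constructor <;> ring

-- ===== VERDICT (by name: the statement is the Claim_ definition above) =====
theorem answer_spec : Claim_equal_answer := by
  intro b finish start m _ _
  unfold Spec_answer answer answer_alt
  apply pv_mod_congr
  have hB := pv_B_congr b m ((start.zip finish).reverse) 0 1 0 1 ⟨0, by ring⟩ ⟨0, by ring⟩
  have hU := pv_B_horner b (start.zip finish) 0 1
  rw [hU] at hB
  have hA := pv_A_congr b m (start.zip finish) 0 0 ⟨0, by ring⟩
  obtain ⟨k1, hk1⟩ := hA
  obtain ⟨k2, hk2⟩ := hB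
  exact ⟨k1 - k2, by linear_combination hk1 - hk2⟩
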